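-- pv_equiv track=rewrite | github.com/brandonhippe/Advent-of-Code | 2023/13/13.py | findRefs
-- ===== SOURCE A (Python) =====
-- def findRefs(pattern):
--     ## Find vertical reflections
--     vertical = {}
--     for i in range(1, len(pattern[0])):
--         vertical[i] = 0
--         leftCol, rightCol = i - 1, i
--
--         while leftCol >= 0 and rightCol < len(pattern[0]):
--             for row in range(len(pattern)):
--                 vertical[i] += pattern[row][leftCol] != pattern[row][rightCol]
--
--             leftCol -= 1
--             rightCol += 1
--
--     ## Find horizontal reflections
--     horizontal = {}
--     for i in range(1, len(pattern)):
--         horizontal[i] = 0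
--         aboveRow, belowRow = i - 1, i
--
--         while aboveRow >= 0 and belowRow < len(pattern):
--             for col in range(len(pattern[0])):
--                 horizontal[i] += pattern[aboveRow][col] != pattern[belowRow][col]
--
--             aboveRow -= 1
--             belowRow += 1
--
--     return vertical, horizontal
-- ===== SOURCE B (Python) =====
-- def findRefs(pattern):
--     H = len(pattern)
--     W = len(pattern[0])
--
--     # Pairwise Hamming-distance tables between columns and between rows.
--     colDist = [[sum(pattern[r][a] != pattern[r][b] for r in range(H))
--                 for b in range(W)] for a in range(W)]
--     rowDist = [[sum(pattern[a][c] != pattern[b][c] for c in range(W))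
--                 for b in range(H)] for a in range(H)]
--
--     def antidiag(tbl, n, i):
--         total, k = 0, 0
--         while i - 1 - k >= 0 and i + k < n:
--             total += tbl[i - 1 - k][i + k]
--             k += 1
--         return total
--
--     vertical = {i: antidiag(colDist, W, i) for i in range(1, W)}
--     horizontal = {i: antidiag(rowDist, H, i) for i in range(1, H)}
--     return vertical, horizontal
-- ===== Notes on version B (the rewrite author's own statement) =====
-- stated objective: alternative
-- what changed: B first builds pairwise Hamming-distance tables between all columns and between all rows, then reads each mirror line's mismatch count by summing one anti-diagonal of a table, instead of A's re-scanning of the whole grid inside each expanding while loop.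
import Mathlib
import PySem

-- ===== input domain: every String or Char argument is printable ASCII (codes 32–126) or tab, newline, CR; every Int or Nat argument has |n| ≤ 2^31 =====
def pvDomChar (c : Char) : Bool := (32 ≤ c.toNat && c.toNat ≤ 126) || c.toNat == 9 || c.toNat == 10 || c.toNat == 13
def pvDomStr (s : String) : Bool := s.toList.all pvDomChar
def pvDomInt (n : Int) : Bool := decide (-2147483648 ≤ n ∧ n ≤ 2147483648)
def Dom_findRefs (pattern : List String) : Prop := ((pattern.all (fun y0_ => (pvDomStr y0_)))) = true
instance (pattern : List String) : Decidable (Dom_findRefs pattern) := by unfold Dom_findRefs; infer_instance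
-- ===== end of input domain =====

-- B replaces A's per-line grid re-scans by precomputed column/row pairwise-distance tables
-- read along anti-diagonals (objective: alternative algorithm, same asymptotic cost).

-- shared grid accessor: pattern[r][c] (total form; in range on every Pre_ input)
def pvCell (pattern : List String) (r c : Int) : Char :=
  PySem.List.pyGetD (PySem.List.pyGetD (pattern.map String.toList) r []) c ' '

-- ===== PORT A =====
-- A's inner while loop for vertical lines: scans all rows at (leftCol, rightCol), then widens
def pvVWhile (pattern : List String) (W l r acc : Int) : Int :=
  if h : 0 ≤ l ∧ r < W then
    pvVWhile pattern W (l - 1) (r + 1)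
      ((PySem.List.pyRange 0 (pattern.length : Int) 1).foldl
        (fun a row => a + (if pvCell pattern row l ≠ pvCell pattern row r then 1 else 0)) acc)
  else acc
termination_by (l + 1).toNat
decreasing_by omega

-- A's inner while loop for horizontal lines: scans all cols at (aboveRow, belowRow), then widens
def pvHWhile (pattern : List String) (W H a b acc : Int) : Int :=
  if h : 0 ≤ a ∧ b < H then
    pvHWhile pattern W H (a - 1) (b + 1)
      ((PySem.List.pyRange 0 W 1).foldl
        (fun t col => t + (if pvCell pattern a col ≠ pvCell pattern b col then 1 else 0)) acc)
  else acc
termination_by (a + 1).toNat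
decreasing_by omega

def findRefs (pattern : List String) : (List (Int × Int)) × (List (Int × Int)) :=
  let W : Int := ((pattern.headD "").toList.length : Int)
  let H : Int := (pattern.length : Int)
  ((PySem.List.pyRange 1 W 1).map (fun i => (i, pvVWhile pattern W (i - 1) i 0)),
   (PySem.List.pyRange 1 H 1).map (fun i => (i, pvHWhile pattern W H (i - 1) i 0)))

-- ===== PORT B =====
-- colDist[a][b] = number of rows r with pattern[r][a] != pattern[r][b]
def pvColDist (pattern : List String) (W H : Int) : List (List Int) :=
  (PySem.List.pyRange 0 W 1).map (fun a =>
    (PySem.List.pyRange 0 W 1).map (fun b =>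
      ((PySem.List.pyRange 0 H 1).map (fun r =>
        if pvCell pattern r a ≠ pvCell pattern r b then (1 : Int) else 0)).sum))

-- rowDist[a][b] = number of cols c with pattern[a][c] != pattern[b][c]
def pvRowDist (pattern : List String) (W H : Int) : List (List Int) :=
  (PySem.List.pyRange 0 H 1).map (fun a =>
    (PySem.List.pyRange 0 H 1).map (fun b =>
      ((PySem.List.pyRange 0 W 1).map (fun c =>
        if pvCell pattern a c ≠ pvCell pattern b c then (1 : Int) else 0)).sum))

-- Source B's antidiag helper: sum tbl[i-1-k][i+k] while both indices are in range
def pvAntidiag (tbl : List (List Int)) (n i k acc : Int) : Int :=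
  if h : 0 ≤ i - 1 - k ∧ i + k < n then
    pvAntidiag tbl n i (k + 1)
      (acc + PySem.List.pyGetD (PySem.List.pyGetD tbl (i - 1 - k) []) (i + k) 0)
  else acc
termination_by (i - k).toNat
decreasing_by omega

def findRefs_alt (pattern : List String) : (List (Int × Int)) × (List (Int × Int)) :=
  let H : Int := (pattern.length : Int)
  let W : Int := ((pattern.headD "").toList.length : Int)
  let cd := pvColDist pattern W H
  let rd := pvRowDist pattern W H
  ((PySem.List.pyRange 1 W 1).map (fun i => (i, pvAntidiag cd W i 0 0)),
   (PySem.List.pyRange 1 H 1).map (fun i => (i, pvAntidiag rd H i 0 0)))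

-- ===== PRECONDITION & SPEC =====
-- Pre_ is exactly where Python's A returns: nonempty pattern whose every row is at least as
-- long as row 0 (empty pattern, or a row shorter than row 0, raises IndexError in A).
def Pre_findRefs (pattern : List String) : Prop :=
  pattern ≠ [] ∧ ∀ s ∈ pattern, (pattern.headD "").toList.length ≤ s.toList.length
instance (pattern : List String) : Decidable (Pre_findRefs pattern) := by
  unfold Pre_findRefs; infer_instance

def pvWitness_findRefs : List String := (["#.#", ".##", "#.#"])

def Spec_findRefs (pattern : List String) (out : (List (Int × Int)) × (List (Int × Int))) : Prop := out = findRefs_alt pattern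
instance (pattern : List String) (out : (List (Int × Int)) × (List (Int × Int))) : Decidable (Spec_findRefs pattern out) := by unfold Spec_findRefs; infer_instance

-- ===== CLAIM (what is proved, stated in full; the proofs are below) =====
def Claim_equal_findRefs : Prop := ∀ (pattern : List String), Dom_findRefs pattern → Pre_findRefs pattern → Spec_findRefs pattern (findRefs pattern)

-- ===== LEMMAS AND PROOFS =====

lemma pv_lookup_colDist (pattern : List String) (W H l r : Int)
    (hl : 0 ≤ l) (hl2 : l < W) (hr : 0 ≤ r) (hr2 : r < W) :
    PySem.List.pyGetD (PySem.List.pyGetD (pvColDist pattern W H) l []) r 0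
      = ((PySem.List.pyRange 0 H 1).map (fun row =>
          if pvCell pattern row l ≠ pvCell pattern row r then (1 : Int) else 0)).sum := by
  unfold pvColDist
  rw [PySem.List.pyGetD_map_pyRange_of_nonneg _ W l [] hl hl2,
      PySem.List.pyGetD_map_pyRange_of_nonneg _ W r 0 hr hr2]

lemma pv_lookup_rowDist (pattern : List String) (W H a b : Int)
    (ha : 0 ≤ a) (ha2 : a < H) (hb : 0 ≤ b) (hb2 : b < H) :
    PySem.List.pyGetD (PySem.List.pyGetD (pvRowDist pattern W H) a []) b 0
      = ((PySem.List.pyRange 0 W 1).map (fun col =>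
          if pvCell pattern a col ≠ pvCell pattern b col then (1 : Int) else 0)).sum := by
  unfold pvRowDist
  rw [PySem.List.pyGetD_map_pyRange_of_nonneg _ H a [] ha ha2,
      PySem.List.pyGetD_map_pyRange_of_nonneg _ H b 0 hb hb2]

lemma pv_vwhile_eq (pattern : List String) (W i : Int) :
    ∀ (m : Nat) (k acc : Int), (i - k).toNat = m → 0 ≤ k →
      pvAntidiag (pvColDist pattern W (pattern.length : Int)) W i k acc
        = pvVWhile pattern W (i - 1 - k) (i + k) acc := by
  intro m
  induction m with
  | zero =>
    intro k acc hm hk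
    rw [pvAntidiag, pvVWhile]
    split_ifs with h
    · exfalso; omega
    · rfl
  | succ n ih =>
    intro k acc hm hk
    rw [pvAntidiag, pvVWhile]
    split_ifs with h
    · rw [pv_lookup_colDist pattern W (pattern.length : Int) (i - 1 - k) (i + k)
          (by omega) (by omega) (by omega) (by omega)]
      rw [PySem.List.foldl_add]
      have h1 : i - 1 - (k + 1) = i - 1 - k - 1 := by ring
      have h2 : i + (k + 1) = i + k + 1 := by ring
      rw [← h1, ← h2]
      exact ih (k + 1) _ (by omega) (by omega)
    · rfl

lemma pv_hwhile_eq (pattern : List String) (W i : Int) :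
    ∀ (m : Nat) (k acc : Int), (i - k).toNat = m → 0 ≤ k →
      pvAntidiag (pvRowDist pattern W (pattern.length : Int)) (pattern.length : Int) i k acc
        = pvHWhile pattern W (pattern.length : Int) (i - 1 - k) (i + k) acc := by
  intro m
  induction m with
  | zero =>
    intro k acc hm hk
    rw [pvAntidiag, pvHWhile]
    split_ifs with h
    · exfalso; omega
    · rfl
  | succ n ih =>
    intro k acc hm hk
    rw [pvAntidiag, pvHWhile]
    split_ifs with h
    · rw [pv_lookup_rowDist pattern W (pattern.length : Int) (i - 1 - k) (i + k)
          (by omega) (by omega) (by omega) (by omega)]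
      rw [PySem.List.foldl_add]
      have h1 : i - 1 - (k + 1) = i - 1 - k - 1 := by ring
      have h2 : i + (k + 1) = i + k + 1 := by ring
      rw [← h1, ← h2]
      exact ih (k + 1) _ (by omega) (by omega)
    · rfl

-- ===== VERDICT (by name: the statement is the Claim_ definition above) =====
theorem findRefs_spec : Claim_equal_findRefs := by
  intro pattern _ _
  unfold Spec_findRefs findRefs findRefs_alt
  refine Prod.ext ?_ ?_ <;> simp only
  · refine List.map_congr_left (fun i _ => ?_)
    refine Prod.ext rfl ?_
    simp only
    have := pv_vwhile_eq pattern ((pattern.headD "").toList.length : Int) i (i - 0).toNat 0 0 rfl le_rfl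
    simpa using this.symm
  · refine List.map_congr_left (fun i _ => ?_)
    refine Prod.ext rfl ?_
    simp only
    have := pv_hwhile_eq pattern ((pattern.headD "").toList.length : Int) i (i - 0).toNat 0 0 rfl le_rfl
    simpa using this.symm
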